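-- pv_equiv track=rewrite | github.com/SooYoungJi/coding_study | 프로그래머스/lv2/12914. 멀리 뛰기/멀리 뛰기.py | solution
-- ===== SOURCE A (Python) =====
-- def solution(n):
--     if n == 1:
--         return n % 1234567
--     elif n == 2:
--         return n % 1234567
--     else:
--         a = 1
--         b = 2
--         for i in range(n-2):
--             a, b = b, a+b
--         return b % 1234567
-- ===== SOURCE B (Python) =====
-- def solution(n):
--     # Fast-doubling Fibonacci mod 1234567: solution(n) = F(n+1) with F(1)=F(2)=1.
--     M = 1234567
--
--     def fd(k):
--         # returns (F(k) % M, F(k+1) % M)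
--         if k == 0:
--             return (0, 1)
--         a, b = fd(k >> 1)
--         c = a * (2 * b - a) % M
--         d = (a * a + b * b) % M
--         if k & 1:
--             return (d, (c + d) % M)
--         return (c, d)
--
--     return fd(n + 1)[0]
-- ===== Notes on version B (the rewrite author's own statement) =====
-- stated objective: faster
-- what changed: Replaced the O(n) iterative Fibonacci loop by O(log n) fast-doubling recursion with modular arithmetic at every step.
-- outside the precondition, e.g. on solution(0): A returns 2, B returns 1; on solution(-3): A returns 2, B raises RecursionError
import Mathlib
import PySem

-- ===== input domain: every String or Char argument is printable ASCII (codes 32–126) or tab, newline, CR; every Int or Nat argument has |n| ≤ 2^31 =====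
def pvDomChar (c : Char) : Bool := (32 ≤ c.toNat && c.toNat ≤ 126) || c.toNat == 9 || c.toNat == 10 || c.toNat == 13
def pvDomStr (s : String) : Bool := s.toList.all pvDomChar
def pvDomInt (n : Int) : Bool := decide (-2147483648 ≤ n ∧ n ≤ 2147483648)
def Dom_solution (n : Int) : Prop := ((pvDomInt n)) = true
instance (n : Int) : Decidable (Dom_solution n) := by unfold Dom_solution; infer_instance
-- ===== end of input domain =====

-- B replaces A's O(n) Fibonacci loop by O(log n) fast-doubling recursion with modular arithmetic (objective: faster).


-- ===== PORT A =====
def solution (n : Int) : Int :=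
  if n = 1 then PySem.Int.mod n 1234567
  else if n = 2 then PySem.Int.mod n 1234567
  else
    let p := (PySem.List.pyRange 0 (n - 2) 1).foldl
      (fun (p : Int × Int) _ => (p.2, p.1 + p.2)) ((1 : Int), (2 : Int))
    PySem.Int.mod p.2 1234567

-- ===== PORT B =====
-- fd recurses on k >> 1; ported on Nat (exact for the nonnegative k = n+1 that Pre_ admits).
def fdB (k : Nat) : Int × Int :=
  if k = 0 then (0, 1)
  else
    let p := fdB (k / 2)
    let a := p.1
    let b := p.2
    let c := PySem.Int.mod (a * (2 * b - a)) 1234567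
    let d := PySem.Int.mod (a * a + b * b) 1234567
    if k % 2 = 1 then (d, PySem.Int.mod (c + d) 1234567) else (c, d)
decreasing_by omega

def solution_alt (n : Int) : Int := (fdB (n + 1).toNat).1

-- ===== PRECONDITION & SPEC =====
-- Pre_ excludes n ≤ 0, outside the problem's domain of positive jump counts: there A returns 2
-- (leftover loop-initial state) while B's fast doubling raises RecursionError (n < 0) or returns 1 (n = 0).
def Pre_solution (n : Int) : Prop := 1 ≤ n
instance (n : Int) : Decidable (Pre_solution n) := by unfold Pre_solution; infer_instance
def pvWitness_solution : Int := (5)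
def Spec_solution (n : Int) (out : Int) : Prop := out = solution_alt n
instance (n : Int) (out : Int) : Decidable (Spec_solution n out) := by unfold Spec_solution; infer_instance

-- ===== CLAIM (what is proved, stated in full; the proofs are below) =====
def Claim_equal_solution : Prop := ∀ (n : Int), Dom_solution n → Pre_solution n → Spec_solution n (solution n)

-- ===== LEMMAS AND PROOFS =====

-- A's loop, started at (F(k+1), F(k+2)), advances the Fibonacci pair once per element.
theorem foldl_fib (l : List Int) (k : Nat) :
    l.foldl (fun (p : Int × Int) _ => (p.2, p.1 + p.2))
      (((Nat.fib (k+1) : Int)), ((Nat.fib (k+2) : Int)))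
    = (((Nat.fib (k+1+l.length) : Int)), ((Nat.fib (k+2+l.length) : Int))) := by
  induction l generalizing k with
  | nil => simp
  | cons x xs ih =>
    simp only [List.foldl_cons]
    have hfib : ((Nat.fib (k+1) : Int)) + ((Nat.fib (k+2) : Int)) = ((Nat.fib (k+3) : Int)) := by
      exact_mod_cast (Nat.fib_add_two (n := k+1)).symm
    simp only [List.length_cons]
    rw [show k+1+(xs.length+1) = (k+2)+xs.length from by omega,
        show k+2+(xs.length+1) = (k+3)+xs.length from by omega, hfib,
        show (k+2) + xs.length = (k+1)+1+xs.length from by omega,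
        show (k+3) + xs.length = (k+1)+2+xs.length from by omega,
        show ((Nat.fib (k+2) : Int)) = ((Nat.fib ((k+1)+1) : Int)) from rfl,
        show ((Nat.fib (k+3) : Int)) = ((Nat.fib ((k+1)+2) : Int)) from rfl]
    exact ih (k+1)

theorem natCast_mod_int (x m : Nat) : ((x % m : Nat) : Int) = (x : Int) % (m : Int) :=
  Int.natCast_mod x m

theorem modeq_cast_mod (x : Nat) : (((x % 1234567 : Nat) : Int)) ≡ (x : Int) [ZMOD (1234567 : Int)] := by
  unfold Int.ModEq
  rw [natCast_mod_int]
  exact Int.emod_emod_of_dvd _ dvd_rfl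

theorem fdB_eq (k : Nat) :
    fdB k = (((Nat.fib k % 1234567 : Nat) : Int), ((Nat.fib (k+1) % 1234567 : Nat) : Int)) := by
  induction k using Nat.strong_induction_on with
  | _ k ih =>
    rw [fdB]
    by_cases h0 : k = 0
    · subst h0; norm_num [Nat.fib]
    · simp only [h0, if_false]
      rw [ih (k / 2) (by omega)]
      set m := k / 2 with hm
      set x := Nat.fib m with hx
      set y := Nat.fib (m+1) with hy
      have hmodpos : (0 : Int) < 1234567 := by norm_num
      have hxy : x ≤ 2 * y := le_trans (Nat.fib_le_fib_succ) (by omega)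
      have ha := modeq_cast_mod x
      have hb := modeq_cast_mod y
      -- c computes fib (2m) mod 1234567
      have hc : PySem.Int.mod (((x % 1234567 : Nat) : Int) * (2 * ((y % 1234567 : Nat) : Int) - ((x % 1234567 : Nat) : Int))) 1234567
          = ((Nat.fib (2*m) % 1234567 : Nat) : Int) := by
        rw [PySem.Int.mod_eq_emod_of_pos hmodpos]
        have hmeq : (((x % 1234567 : Nat) : Int) * (2 * ((y % 1234567 : Nat) : Int) - ((x % 1234567 : Nat) : Int)))
            ≡ ((x : Int) * (2 * (y : Int) - (x : Int))) [ZMOD (1234567 : Int)] :=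
          ha.mul ((hb.mul_left 2).sub ha)
        rw [hmeq]
        have hval : ((x : Int) * (2 * (y : Int) - (x : Int))) = ((x * (2 * y - x) : Nat) : Int) := by
          push_cast [Nat.cast_sub hxy]; ring
        rw [hval, ← Nat.fib_two_mul, natCast_mod_int]; norm_num
      -- d computes fib (2m+1) mod 1234567
      have hd : PySem.Int.mod (((x % 1234567 : Nat) : Int) * ((x % 1234567 : Nat) : Int) + ((y % 1234567 : Nat) : Int) * ((y % 1234567 : Nat) : Int)) 1234567
          = ((Nat.fib (2*m+1) % 1234567 : Nat) : Int) := by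
        rw [PySem.Int.mod_eq_emod_of_pos hmodpos]
        have hmeq : (((x % 1234567 : Nat) : Int) * ((x % 1234567 : Nat) : Int) + ((y % 1234567 : Nat) : Int) * ((y % 1234567 : Nat) : Int))
            ≡ ((x : Int) * (x : Int) + (y : Int) * (y : Int)) [ZMOD (1234567 : Int)] :=
          (ha.mul ha).add (hb.mul hb)
        rw [hmeq]
        have hval : ((x : Int) * (x : Int) + (y : Int) * (y : Int)) = ((Nat.fib (2*m+1) : Nat) : Int) := by
          rw [Nat.fib_two_mul_add_one]; push_cast; ring
        rw [hval, natCast_mod_int]; norm_num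
      simp only [hc, hd]
      by_cases hodd : k % 2 = 1
      · simp only [hodd, if_true]
        have hk : k = 2*m + 1 := by omega
        have hsum : PySem.Int.mod (((Nat.fib (2*m) % 1234567 : Nat) : Int) + ((Nat.fib (2*m+1) % 1234567 : Nat) : Int)) 1234567
            = ((Nat.fib (2*m+2) % 1234567 : Nat) : Int) := by
          rw [PySem.Int.mod_eq_emod_of_pos hmodpos]
          have hmeq : (((Nat.fib (2*m) % 1234567 : Nat) : Int) + ((Nat.fib (2*m+1) % 1234567 : Nat) : Int))
              ≡ ((Nat.fib (2*m) : Int) + (Nat.fib (2*m+1) : Int)) [ZMOD (1234567 : Int)] :=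
            (modeq_cast_mod _).add (modeq_cast_mod _)
          rw [hmeq]
          have : ((Nat.fib (2*m) : Int) + (Nat.fib (2*m+1) : Int)) = ((Nat.fib (2*m+2) : Nat) : Int) := by
            rw [Nat.fib_add_two]; push_cast; ring
          rw [this, natCast_mod_int]; norm_num
        rw [hsum, hk]
      · simp only [hodd, if_false]
        have hk : k = 2*m := by omega
        rw [hk]

theorem solution_eq_fib (n : Int) (h : 1 ≤ n) :
    solution n = ((Nat.fib (n.toNat + 1) % 1234567 : Nat) : Int) := by
  unfold solution
  by_cases h1 : n = 1
  · subst h1; decide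
  · by_cases h2 : n = 2
    · subst h2; decide
    · have h3 : 3 ≤ n := by omega
      simp only [h1, h2, if_false]
      have hfold := foldl_fib (PySem.List.pyRange 0 (n-2) 1) 1
      have hlen : (PySem.List.pyRange 0 (n-2) 1).length = (n-2).toNat := by
        rw [PySem.List.length_pyRange_one]; congr 1; omega
      norm_num at hfold
      rw [hfold]
      simp only []
      rw [show 3 + (n-2).toNat = n.toNat + 1 from by omega]
      rw [PySem.Int.mod_eq_emod_of_pos (by norm_num : (0:Int) < 1234567), natCast_mod_int]
      norm_num

-- ===== VERDICT (by name: the statement is the Claim_ definition above) =====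
theorem solution_spec : Claim_equal_solution := by
  intro n _ hpre
  unfold Spec_solution solution_alt
  have h1 : 1 ≤ n := hpre
  rw [fdB_eq, solution_eq_fib n h1]
  have : (n + 1).toNat = n.toNat + 1 := by omega
  rw [this]
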